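-- pv_equiv track=rewrite | github.com/gtcooke94/random_snippets | morsels/20191014_format_ranges/format_ranges.py | get_range_tuples
-- ===== SOURCE A (Python) =====
-- from itertools import groupby
-- from operator import itemgetter
--
-- def get_range_tuples(numbers):
--     numbers = sorted(numbers)
--     # Match value with index
--     numbers = enumerate(numbers)
--     # Group by difference in number and index. Consecutive numbers will have the same difference, so jumps in this correspond to non consecutive numbers
--     grouped = groupby(numbers, lambda it: it[1] - it[0])
--     range_tuples = []
--     for range_val in range_vals(grouped):
--         range_val = list(range_val)
--         low = range_val[0]
--         high = range_val[-1]
--         range_tuples.append([low, high])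
--     return range_tuples
--
-- def range_vals(grouped):
--     for _, group in grouped:
--         yield map(itemgetter(1), group)
-- ===== SOURCE B (Python) =====
-- def get_range_tuples(numbers):
--     s = sorted(numbers)
--     if not s:
--         return []
--     result = []
--     low = prev = s[0]
--     for curr in s[1:]:
--         if curr != prev + 1:
--             result.append([low, prev])
--             low = curr
--         prev = curr
--     result.append([low, prev])
--     return result
-- ===== Notes on version B (the rewrite author's own statement) =====
-- stated objective: idiomatic
-- what changed: Replaces the enumerate/groupby-on-(value-index) pipeline with a direct single pass over the sorted list tracking the current run's low and previous value, appending [low, prev] at each break.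
import Mathlib
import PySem

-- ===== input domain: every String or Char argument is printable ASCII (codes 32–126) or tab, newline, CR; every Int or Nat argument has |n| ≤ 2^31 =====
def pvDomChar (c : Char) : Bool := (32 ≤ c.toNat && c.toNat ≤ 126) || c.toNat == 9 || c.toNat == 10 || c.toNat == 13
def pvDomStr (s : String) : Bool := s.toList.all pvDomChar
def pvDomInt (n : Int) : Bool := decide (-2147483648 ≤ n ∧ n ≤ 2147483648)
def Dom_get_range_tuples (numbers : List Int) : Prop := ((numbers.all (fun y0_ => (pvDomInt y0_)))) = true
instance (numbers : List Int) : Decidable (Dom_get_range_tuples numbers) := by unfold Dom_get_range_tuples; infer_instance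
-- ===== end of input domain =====

-- B replaces the enumerate/groupby pipeline by one direct scan of the sorted list (idiomatic).

-- ===== PORT A =====
-- itertools.groupby on a materialised list: consecutive elements with equal keys are grouped.
def pyGroupby (key : Int × Int → Int) : List (Int × Int) → List (Int × List (Int × Int))
  | [] => []
  | a :: rest =>
    match pyGroupby key rest with
    | (k', g) :: gs => if key a = k' then (key a, a :: g) :: gs else (key a, [a]) :: (k', g) :: gs
    | [] => [(key a, [a])]

def get_range_tuples (numbers : List Int) : List (List Int) :=
  let s := PySem.List.sorted numbers (fun x => x) false
  let enu := PySem.List.enumerate s 0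
  let grouped := pyGroupby (fun it => it.2 - it.1) enu
  -- range_vals yields map(itemgetter(1), group) for each group; the loop takes range_val[0] and
  -- range_val[-1]. Groups produced by groupby are nonempty, so the indexing never raises and
  -- headD/getLastD with a dummy default are exact here.
  grouped.foldl (fun acc g =>
    let vals := g.2.map Prod.snd
    acc ++ [[vals.headD 0, vals.getLastD 0]]) []

-- ===== PORT B =====
def altLoop (acc : List (List Int)) (low prev : Int) : List Int → List (List Int)
  | [] => acc ++ [[low, prev]]
  | c :: rest =>
    if c ≠ prev + 1 then altLoop (acc ++ [[low, prev]]) c c rest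
    else altLoop acc low c rest

def get_range_tuples_alt (numbers : List Int) : List (List Int) :=
  match PySem.List.sorted numbers (fun x => x) false with
  | [] => []
  | x :: rest => altLoop [] x x rest

-- ===== PRECONDITION & SPEC =====
def Spec_get_range_tuples (numbers : List Int) (out : List (List Int)) : Prop := out = get_range_tuples_alt numbers
instance (numbers : List Int) (out : List (List Int)) : Decidable (Spec_get_range_tuples numbers out) := by unfold Spec_get_range_tuples; infer_instance

-- ===== CLAIM (what is proved, stated in full; the proofs are below) =====
def Claim_equal_get_range_tuples : Prop := ∀ (numbers : List Int), Dom_get_range_tuples numbers → Spec_get_range_tuples numbers (get_range_tuples numbers)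

-- ===== LEMMAS AND PROOFS =====

-- the [low, high] row A emits for one group
def rng (g : Int × List (Int × Int)) : List Int :=
  [(g.2.map Prod.snd).headD 0, (g.2.map Prod.snd).getLastD 0]

-- A's output on a list s, abstracted over the enumeration start index.
def aOut (i : Int) (s : List Int) : List (List Int) :=
  (pyGroupby (fun it => it.2 - it.1) (PySem.List.enumerate s i)).foldl
    (fun acc g =>
      let vals := g.2.map Prod.snd
      acc ++ [[vals.headD 0, vals.getLastD 0]]) []

theorem foldl_ranges_eq_map (gs : List (Int × List (Int × Int))) (acc : List (List Int)) :
    gs.foldl (fun acc g =>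
      let vals := g.2.map Prod.snd
      acc ++ [[vals.headD 0, vals.getLastD 0]]) acc
    = acc ++ gs.map rng := by
  induction gs generalizing acc with
  | nil => simp
  | cons g gs ih => rw [List.foldl_cons, ih]; simp [rng]

theorem aOut_eq_map (i : Int) (s : List Int) :
    aOut i s = (pyGroupby (fun it => it.2 - it.1) (PySem.List.enumerate s i)).map rng := by
  unfold aOut; rw [foldl_ranges_eq_map]; simp

-- groupby on a nonempty list: the first group starts with the first element.
theorem pyGroupby_cons_shape (key : Int × Int → Int) (a : Int × Int) (l : List (Int × Int)) :
    ∃ g gs, pyGroupby key (a :: l) = (key a, a :: g) :: gs := by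
  unfold pyGroupby
  rcases h : pyGroupby key l with _ | ⟨⟨k', g⟩, gs⟩
  · exact ⟨[], [], rfl⟩
  · by_cases hk : key a = k'
    · exact ⟨g, gs, by simp [hk]⟩
    · exact ⟨[], (k', g) :: gs, by simp [hk]⟩

theorem altLoop_acc (acc : List (List Int)) (low prev : Int) (xs : List Int) :
    altLoop acc low prev xs = acc ++ altLoop [] low prev xs := by
  induction xs generalizing acc low prev with
  | nil => simp [altLoop]
  | cons c rest ih =>
    by_cases h : c = prev + 1
    · simp [altLoop, h]
      rw [ih, ih []]
    · simp [altLoop, h]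
      rw [ih, ih [[low, prev]]]
      simp

theorem rng_cons (k i v : Int) (g : List (Int × Int)) :
    rng (k, (i, v) :: g) = [v, ((i, v) :: g).map Prod.snd |>.getLastD 0] := by
  simp [rng]

-- aOut's head entry is [x, L] for some L; replacing x by any `low` gives B's loop.
theorem aOut_cons (i x : Int) (xs : List Int) :
    ∃ L rest, aOut i (x :: xs) = [x, L] :: rest ∧
      ∀ low, [low, L] :: rest = altLoop [] low x xs := by
  induction xs generalizing i x with
  | nil =>
    refine ⟨x, [], ?_, ?_⟩
    · simp [aOut, PySem.List.enumerate_cons, PySem.List.enumerate_nil, pyGroupby]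
    · intro low; simp [altLoop]
  | cons y ys ih =>
    obtain ⟨L, rest, hA, hB⟩ := ih (i + 1) y
    obtain ⟨g, gs, hg⟩ := pyGroupby_cons_shape (fun it => it.2 - it.1)
      (i + 1, y) (PySem.List.enumerate ys (i + 1 + 1))
    have henu : PySem.List.enumerate (x :: y :: ys) i
        = (i, x) :: (i + 1, y) :: PySem.List.enumerate ys (i + 1 + 1) := by
      simp [PySem.List.enumerate_cons]
    have henu1 : PySem.List.enumerate (y :: ys) (i + 1)
        = (i + 1, y) :: PySem.List.enumerate ys (i + 1 + 1) := by
      simp [PySem.List.enumerate_cons]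
    have htail : aOut (i + 1) (y :: ys) = rng (y - (i + 1), (i + 1, y) :: g) :: gs.map rng := by
      rw [aOut_eq_map, henu1, hg]; simp
    by_cases h : y = x + 1
    · -- same key: x joins the first group of the tail
      have hkey : x - i = y - (i + 1) := by omega
      have hthis : aOut i (x :: y :: ys) = rng (x - i, (i, x) :: (i + 1, y) :: g) :: gs.map rng := by
        rw [aOut_eq_map, henu]
        rw [show pyGroupby (fun it => it.2 - it.1)
            ((i, x) :: (i + 1, y) :: PySem.List.enumerate ys (i + 1 + 1))
            = (x - i, (i, x) :: (i + 1, y) :: g) :: gs by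
          unfold pyGroupby; rw [hg]; simp [hkey]]
        simp
      -- both head rows share the same last value
      have hlast : rng (x - i, (i, x) :: (i + 1, y) :: g)
          = [x, ((i + 1, y) :: g).map Prod.snd |>.getLastD 0] := by
        simp [rng, List.getLastD]
      rw [rng_cons] at htail
      rw [htail] at hA
      obtain ⟨hL, hrest⟩ : (((i + 1, y) :: g).map Prod.snd).getLastD 0 = L ∧ gs.map rng = rest := by
        simpa using hA
      refine ⟨L, rest, ?_, ?_⟩
      · rw [hthis, hlast, hL, hrest]
      · intro low
        rw [show altLoop [] low x (y :: ys) = altLoop [] low y ys by simp [altLoop, h]]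
        exact hB low
    · -- key break: x is its own group
      have hkey : ¬ (x - i = y - (i + 1)) := by omega
      have hthis : aOut i (x :: y :: ys) = [x, x] :: aOut (i + 1) (y :: ys) := by
        rw [aOut_eq_map, henu]
        rw [show pyGroupby (fun it => it.2 - it.1)
            ((i, x) :: (i + 1, y) :: PySem.List.enumerate ys (i + 1 + 1))
            = (x - i, [(i, x)]) :: (y - (i + 1), (i + 1, y) :: g) :: gs by
          unfold pyGroupby; rw [hg]; simp [hkey]]
        rw [aOut_eq_map, henu1, hg]
        simp [rng]
      refine ⟨x, aOut (i + 1) (y :: ys), hthis, ?_⟩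
      intro low
      rw [show altLoop [] low x (y :: ys) = altLoop [[low, x]] y y ys by simp [altLoop, h]]
      rw [altLoop_acc]
      rw [hA, hB y]
      simp

-- ===== VERDICT (by name: the statement is the Claim_ definition above) =====
theorem get_range_tuples_spec : Claim_equal_get_range_tuples := by
  intro numbers _
  unfold Spec_get_range_tuples get_range_tuples get_range_tuples_alt
  rcases hs : PySem.List.sorted numbers (fun x => x) false with _ | ⟨x, xs⟩
  · simp [PySem.List.enumerate_nil, pyGroupby]
  · obtain ⟨L, rest, hA, hB⟩ := aOut_cons 0 x xs
    have : aOut 0 (x :: xs) = altLoop [] x x xs := by rw [hA]; exact hB x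
    simpa [aOut] using this
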